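-- pv_equiv track=rewrite | github.com/AmadoMiguel/Coding-problems | Python/April-2020/fileNaming.py | nF
-- ===== SOURCE A (Python) =====
-- def nF(nn, fs, hm):
--     aP = False
--     cN = 1
--     while nn in hm.keys():
--         if not aP:
--             nn += "("+str(cN)+")"
--             aP = True
--         else:
--             lP = len(nn) - 1 - nn[::-1].find("(")
--             subS = nn[lP:]
--             subS = subS.replace(subS[1:-1], str(int(cN)))
--             nn = nn[:lP] + subS
--             cN += 1
--     return nn
-- ===== SOURCE B (Python) =====
-- def nF(nn, fs, hm):
--     if nn not in hm:
--         return nn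
--     pre = nn + "("
--     taken = {key[len(pre):-1] for key in hm if key.startswith(pre) and key.endswith(")")}
--     k = 1
--     while str(k) in taken:
--         k += 1
--     return pre + str(k) + ")"
-- ===== Notes on version B (the rewrite author's own statement) =====
-- stated objective: alternative
-- what changed: A probes candidate names nn(1), nn(1), nn(2), ... one by one against the dict keys, rebuilding the suffix in place with rfind/slice/replace; B instead makes one indexing pass over the keys, collecting the set of suffix strings s of keys of the form nn+'('+s+')', and then returns nn+'('+str(k)+')' for the smallest k with str(k) not in that set.
import Mathlib
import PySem

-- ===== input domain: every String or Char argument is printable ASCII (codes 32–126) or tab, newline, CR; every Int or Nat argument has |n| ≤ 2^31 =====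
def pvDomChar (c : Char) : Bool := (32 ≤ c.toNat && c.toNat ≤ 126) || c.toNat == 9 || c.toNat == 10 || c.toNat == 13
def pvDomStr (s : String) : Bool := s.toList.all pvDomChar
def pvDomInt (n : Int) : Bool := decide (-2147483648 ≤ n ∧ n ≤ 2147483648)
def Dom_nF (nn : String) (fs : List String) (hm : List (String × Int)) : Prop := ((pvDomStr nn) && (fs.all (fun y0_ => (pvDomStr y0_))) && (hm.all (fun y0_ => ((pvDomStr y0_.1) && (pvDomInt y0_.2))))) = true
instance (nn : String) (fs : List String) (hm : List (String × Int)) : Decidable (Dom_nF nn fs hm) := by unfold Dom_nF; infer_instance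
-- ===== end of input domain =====

-- B replaces A's repeated "probe a candidate name against the dict keys" loop by a single
-- indexing pass (collect the parenthesised numeric suffixes already used into a set), then a
-- scan for the smallest free counter — a different algorithm with the same exact result.

-- ===== PORT A =====
-- A's while-loop as a fuelled recursion; fuel hm.length + 3 provably suffices (nFLoopA_phase below).
def nFLoopA (keys : List String) : Nat → String → Bool → Int → String
  | 0, nn, _, _ => nn
  | fuel+1, nn, aP, cN =>
    if keys.contains nn then
      if aP = false then
        nFLoopA keys fuel (nn ++ "(" ++ PySem.Int.toStr cN ++ ")") true cN
      else
        -- lP = len(nn) - 1 - nn[::-1].find("(")   (nn[::-1] is slice? step -1, always `some`)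
        let lP : Int := (PySem.Str.len nn : Int) - 1 - PySem.Str.find ((PySem.Str.slice? nn none none (-1)).getD "") "("
        let subS := PySem.Str.slice nn (some lP) none
        let subS := PySem.Str.replace subS (PySem.Str.slice subS (some 1) (some (-1))) (PySem.Int.toStr cN)
        nFLoopA keys fuel (PySem.Str.slice nn none (some lP) ++ subS) aP (cN + 1)
    else nn

def nF (nn : String) (fs : List String) (hm : List (String × Int)) : String :=
  nFLoopA (hm.map Prod.fst) (hm.length + 3) nn false 1

-- ===== PORT B =====
-- {key[len(pre):-1] for key in hm if key.startswith(pre) and key.endswith(")")}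
def nFTaken (pre : String) (hm : List (String × Int)) : PySem.Set String :=
  PySem.Set.ofList ((hm.map Prod.fst).filterMap (fun key =>
    if PySem.Str.startswith key pre && PySem.Str.endswith key ")" then
      some (PySem.Str.slice key (some ((PySem.Str.len pre : Int))) (some (-1)))
    else none))

-- while str(k) in taken: k += 1   (fuel taken.length + 1 provably suffices)
def nFFind (taken : PySem.Set String) : Nat → Int → Int
  | 0, k => k
  | fuel+1, k => if PySem.Set.contains taken (PySem.Int.toStr k) then nFFind taken fuel (k+1) else k

def nF_alt (nn : String) (fs : List String) (hm : List (String × Int)) : String :=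
  if (hm.map Prod.fst).contains nn = false then nn
  else
    let pre := nn ++ "("
    let taken := nFTaken pre hm
    let k := nFFind taken (taken.length + 1) 1
    pre ++ PySem.Int.toStr k ++ ")"

-- ===== PRECONDITION & SPEC =====
def Spec_nF (nn : String) (fs : List String) (hm : List (String × Int)) (out : String) : Prop := out = nF_alt nn fs hm
instance (nn : String) (fs : List String) (hm : List (String × Int)) (out : String) : Decidable (Spec_nF nn fs hm out) := by unfold Spec_nF; infer_instance

-- ===== CLAIM (what is proved, stated in full; the proofs are below) =====
def Claim_equal_nF : Prop := ∀ (nn : String) (fs : List String) (hm : List (String × Int)), Dom_nF nn fs hm → Spec_nF nn fs hm (nF nn fs hm)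

-- ===== LEMMAS AND PROOFS =====

-- ---- decimal digits of str(n) ----
def pvDigits (d : List Char) : Prop := ∀ c ∈ d, 48 ≤ c.toNat ∧ c.toNat ≤ 57

def pvVal (l : List Char) : Nat := l.foldl (fun a c => 10 * a + (c.toNat - 48)) 0

lemma pvVal_append (l : List Char) (c : Char) :
    pvVal (l ++ [c]) = 10 * pvVal l + (c.toNat - 48) := by
  simp [pvVal, List.foldl_append]

lemma digitChar_toNat {r : Nat} (h : r < 10) : (Nat.digitChar r).toNat = 48 + r := by
  interval_cases r <;> rfl

lemma tdc_acc (f : Nat) : ∀ (n : Nat) (acc : List Char),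
    Nat.toDigitsCore 10 f n acc = Nat.toDigitsCore 10 f n [] ++ acc := by
  induction f with
  | zero => intro n acc; simp [Nat.toDigitsCore]
  | succ f ih =>
    intro n acc
    simp only [Nat.toDigitsCore]
    by_cases h : n / 10 = 0
    · simp [h]
    · simp only [if_neg h]
      rw [ih (n / 10) (_ :: acc), ih (n / 10) [_]]
      simp

lemma tdc_props (f : Nat) : ∀ n : Nat, n < f →
    Nat.toDigitsCore 10 f n [] ≠ [] ∧ pvDigits (Nat.toDigitsCore 10 f n []) ∧
      pvVal (Nat.toDigitsCore 10 f n []) = n := by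
  induction f with
  | zero => omega
  | succ f ih =>
    intro n hn
    simp only [Nat.toDigitsCore]
    by_cases h : n / 10 = 0
    · refine ⟨by simp [h], ?_, ?_⟩
      · simp only [if_pos h]
        intro c hc
        simp at hc
        subst hc
        rw [digitChar_toNat (Nat.mod_lt _ (by norm_num))]
        omega
      · simp only [if_pos h, pvVal, List.foldl]
        rw [digitChar_toNat (Nat.mod_lt _ (by norm_num))]
        omega
    · have hlt : n / 10 < f := by omega
      obtain ⟨h1, h2, h3⟩ := ih (n / 10) hlt
      rw [if_neg h, tdc_acc]
      refine ⟨by simp [h1], ?_, ?_⟩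
      · intro c hc
        rcases List.mem_append.1 hc with hc | hc
        · exact h2 c hc
        · simp at hc; subst hc
          rw [digitChar_toNat (Nat.mod_lt _ (by norm_num))]
          omega
      · rw [pvVal_append, h3, digitChar_toNat (Nat.mod_lt _ (by norm_num))]
        omega

lemma toDigits_inj {a b : Nat} (h : Nat.toDigits 10 a = Nat.toDigits 10 b) : a = b := by
  have ha := (tdc_props (a+1) a (by omega)).2.2
  have hb := (tdc_props (b+1) b (by omega)).2.2
  unfold Nat.toDigits at h
  rw [← ha, ← hb, h]

lemma toChars_pos {k : Int} (h : 1 ≤ k) : PySem.Int.toChars k = Nat.toDigits 10 k.toNat := by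
  simp [PySem.Int.toChars, show ¬ k < 0 by omega]

lemma toChars_ne_nil {k : Int} (h : 1 ≤ k) : PySem.Int.toChars k ≠ [] := by
  rw [toChars_pos h]; exact (tdc_props _ _ (by omega)).1

lemma toChars_digits {k : Int} (h : 1 ≤ k) : pvDigits (PySem.Int.toChars k) := by
  rw [toChars_pos h]; exact (tdc_props _ _ (by omega)).2.1

lemma toChars_inj {a b : Int} (ha : 1 ≤ a) (hb : 1 ≤ b)
    (h : PySem.Int.toChars a = PySem.Int.toChars b) : a = b := by
  rw [toChars_pos ha, toChars_pos hb] at h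
  have := toDigits_inj h
  omega

-- ---- find / replace on the "(digits)" suffix ----
lemma prefix_single {a : Char} {l : List Char} : [a] <+: l ↔ l.head? = some a := by
  cases l with
  | nil => simp
  | cons c t => simp [List.cons_prefix_cons, eq_comm]

lemma find_left (l1 l2 : List Char) (a : Char) (h : ∀ c ∈ l1, c ≠ a) :
    PySem.Chars.find (l1 ++ a :: l2) [a] = (l1.length : Int) := by
  set s := l1 ++ a :: l2 with hs
  have hpre : [a] <+: s.drop l1.length := by
    rw [hs, List.drop_left]; simp
  have hnn : 0 ≤ PySem.Chars.find s [a] := by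
    rw [PySem.Chars.find_nonneg_iff]
    exact ⟨l1, l2, by simp [hs]⟩
  obtain ⟨h1, h2⟩ := PySem.Chars.find_spec hnn
  have hne : ∀ i < l1.length, ¬ [a] <+: s.drop i := by
    intro i hi hp
    rw [prefix_single, List.head?_drop, hs, List.getElem?_append_left hi] at hp
    exact h a (List.mem_of_getElem? hp) rfl
  have hle : (PySem.Chars.find s [a]).toNat ≤ l1.length := by
    by_contra hgt
    exact (h2 l1.length (by omega)) hpre
  have hge : l1.length ≤ (PySem.Chars.find s [a]).toNat := by
    by_contra hlt
    exact hne _ (by omega) h1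
  omega

lemma go_nil (old new : List Char) (f : Nat) (acc : List Char) :
    PySem.Chars.replace.go old new f [] acc = acc.reverse := by
  cases f <;> simp [PySem.Chars.replace.go]

lemma go_step (old new : List Char) (f : Nat) (c : Char) (t acc : List Char) :
    PySem.Chars.replace.go old new (f+1) (c :: t) acc =
      if old.isPrefixOf (c :: t) then
        PySem.Chars.replace.go old new f (List.drop old.length (c :: t)) (new.reverse ++ acc)
      else PySem.Chars.replace.go old new f t (c :: acc) := by
  simp [PySem.Chars.replace.go]

lemma replace_paren (d e : List Char) (hne : d ≠ []) (hd : pvDigits d) :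
    PySem.Chars.replace ('(' :: d ++ [')']) d e = '(' :: e ++ [')'] := by
  obtain ⟨c, t, rfl⟩ := List.exists_cons_of_ne_nil hne
  have hc := hd c (by simp)
  have hcp : c ≠ '(' := by intro h; rw [h] at hc; simp [Char.toNat] at hc
  have hcr : c ≠ ')' := by intro h; rw [h] at hc; simp [Char.toNat] at hc
  have h1 : (c :: t).isPrefixOf ('(' :: ((c :: t) ++ [')'])) = false := by
    simp [List.isPrefixOf, hcp]
  have h2 : (c :: t).isPrefixOf ((c :: t) ++ [')']) = true := by
    rw [List.isPrefixOf_iff_prefix]; exact List.prefix_append _ _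
  have h3 : (c :: t).isPrefixOf [')'] = false := by
    cases t <;> simp [List.isPrefixOf, hcr]
  rw [show PySem.Chars.replace ('(' :: (c :: t) ++ [')']) (c :: t) e =
      PySem.Chars.replace.go (c :: t) e (t.length + 3) ('(' :: (c :: t) ++ [')']) [] from by
    simp [PySem.Chars.replace]]
  simp only [List.cons_append] at h1 h2 ⊢
  rw [go_step, if_neg (by simp [h1])]
  rw [go_step, if_pos h2]
  rw [show List.drop (c :: t).length (c :: (t ++ [')'])) = [')'] from by
    simpa using List.drop_left (c :: t) [')']]
  rw [go_step, if_neg (by simp [h3])]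
  rw [go_nil]
  simp

-- ---- the candidate name nn + "(" + str(k) + ")" ----
def pvCand (nn : String) (k : Int) : String := nn ++ "(" ++ PySem.Int.toStr k ++ ")"

lemma toList_pvCand (nn : String) (k : Int) :
    (pvCand nn k).toList = nn.toList ++ '(' :: (PySem.Int.toChars k ++ [')']) := by
  simp [pvCand, String.toList_append, PySem.Int.toList_toStr]

lemma pvCand_inj {nn : String} {a b : Int} (ha : 1 ≤ a) (hb : 1 ≤ b)
    (h : pvCand nn a = pvCand nn b) : a = b := by
  have h' := congrArg String.toList h
  rw [toList_pvCand, toList_pvCand] at h'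
  have h2 := List.append_cancel_left h'
  simp only [List.cons.injEq, true_and] at h2
  exact toChars_inj ha hb (List.append_cancel_right h2)

lemma else_value (nn : String) (s c : Int) (hs : 1 ≤ s) :
    (PySem.Str.slice (pvCand nn s) none
        (some ((PySem.Str.len (pvCand nn s) : Int) - 1 -
          PySem.Str.find ((PySem.Str.slice? (pvCand nn s) none none (-1)).getD "") "(")) ++
      PySem.Str.replace
        (PySem.Str.slice (pvCand nn s)
          (some ((PySem.Str.len (pvCand nn s) : Int) - 1 -
            PySem.Str.find ((PySem.Str.slice? (pvCand nn s) none none (-1)).getD "") "(")) none)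
        (PySem.Str.slice
          (PySem.Str.slice (pvCand nn s)
            (some ((PySem.Str.len (pvCand nn s) : Int) - 1 -
              PySem.Str.find ((PySem.Str.slice? (pvCand nn s) none none (-1)).getD "") "(")) none)
          (some 1) (some (-1)))
        (PySem.Int.toStr c)) = pvCand nn c := by
  set d := PySem.Int.toChars s with hdd
  have hdne : d ≠ [] := toChars_ne_nil hs
  have hdig : pvDigits d := toChars_digits hs
  have hfind : PySem.Str.find ((PySem.Str.slice? (pvCand nn s) none none (-1)).getD "") "(" = (d.length : Int) + 1 := by
    rw [PySem.Str.slice?_none_none_neg_one]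
    simp only [Option.getD_some]
    rw [PySem.Str.find_eq]
    have : (String.ofList (pvCand nn s).toList.reverse).toList = (pvCand nn s).toList.reverse := by
      simp
    rw [this, toList_pvCand]
    have hrev : (nn.toList ++ '(' :: (d ++ [')'])).reverse = (')' :: d.reverse) ++ '(' :: nn.toList.reverse := by
      simp
    rw [hrev]
    have : ("(" : String).toList = ['('] := rfl
    rw [this, find_left]
    · simp
    · intro ch hch
      rcases List.mem_cons.1 hch with h | h
      · subst h; decide
      · have := hdig ch (List.mem_reverse.1 h)
        intro he; subst he; simp [Char.toNat] at this
  have hlP : (PySem.Str.len (pvCand nn s) : Int) - 1 -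
      PySem.Str.find ((PySem.Str.slice? (pvCand nn s) none none (-1)).getD "") "(" = (nn.toList.length : Int) := by
    rw [hfind, PySem.Str.len_eq, toList_pvCand, ← hdd]
    simp [List.length_append]
    omega
  rw [hlP]
  have hsubS : (PySem.Str.slice (pvCand nn s) (some (nn.toList.length : Int)) none).toList = '(' :: (d ++ [')']) := by
    rw [PySem.Str.toList_slice]
    simp only [PySem.Chars.slice_eq_listSlice]
    rw [PySem.List.slice_from_natCast, toList_pvCand, ← hdd]
    simp
  have hpreS : (PySem.Str.slice (pvCand nn s) none (some (nn.toList.length : Int))).toList = nn.toList := by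
    rw [PySem.Str.toList_slice]
    simp only [PySem.Chars.slice_eq_listSlice]
    rw [PySem.List.slice_to_natCast, toList_pvCand, ← hdd]
    simp
  have hinner : (PySem.Str.slice
      (PySem.Str.slice (pvCand nn s) (some (nn.toList.length : Int)) none) (some 1) (some (-1))).toList = d := by
    rw [PySem.Str.toList_slice]
    simp only [PySem.Chars.slice_eq_listSlice]
    rw [hsubS]
    simp only [PySem.List.slice, PySem.List.clampIdx]
    norm_num
    rw [if_neg (by omega)]
    simp
  rw [← String.toList_inj]
  rw [String.toList_append, hpreS, PySem.Str.toList_replace, hinner, hsubS, PySem.Int.toList_toStr]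
  rw [show ('(' :: (d ++ [')'])) = '(' :: d ++ [')'] by simp]
  rw [replace_paren d _ hdne hdig, toList_pvCand]
  simp

-- ---- A's loop after the first iteration ----
lemma loopA_step_else (keys : List String) (nn : String) (s c : Int) (f : Nat) (hs : 1 ≤ s) :
    nFLoopA keys (f+1) (pvCand nn s) true c =
      if keys.contains (pvCand nn s) then nFLoopA keys f (pvCand nn c) true (c+1)
      else pvCand nn s := by
  simp only [nFLoopA]
  cases hb : keys.contains (pvCand nn s) with
  | false => simp
  | true =>
    rw [if_pos rfl, if_pos rfl, if_neg (by simp), else_value nn s c hs]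

lemma loopA_enter (keys : List String) (nn : String) (cN : Int) (f : Nat) :
    nFLoopA keys (f+1) nn false cN =
      if keys.contains nn then nFLoopA keys f (nn ++ "(" ++ PySem.Int.toStr cN ++ ")") true cN
      else nn := by
  simp only [nFLoopA]
  cases hb : keys.contains nn <;> simp

lemma loopA_run (keys : List String) (nn : String) (μ : Int) (hμ1 : 1 ≤ μ)
    (hfree : keys.contains (pvCand nn μ) = false)
    (hmin : ∀ j : Int, 1 ≤ j → j < μ → keys.contains (pvCand nn j) = true) :
    ∀ (f : Nat) (s c : Int), 1 ≤ s → s ≤ μ → (c = s + 1 ∨ (s = 1 ∧ c = 1)) →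
      μ.toNat - s.toNat + (if c = s then 2 else 1) ≤ f →
      nFLoopA keys f (pvCand nn s) true c = pvCand nn μ := by
  intro f
  induction f with
  | zero =>
    intro s c hs1 hsμ hc hfuel
    by_cases h : c = s <;> simp [h] at hfuel
  | succ f ih =>
    intro s c hs1 hsμ hc hfuel
    rw [loopA_step_else keys nn s c f hs1]
    by_cases heq : s = μ
    · rw [heq, hfree]
      simp
    · have hlt : s < μ := lt_of_le_of_ne hsμ heq
      rw [hmin s hs1 hlt, if_pos rfl]
      rcases hc with hc | ⟨hs1', hc1⟩
      · subst hc
        exact ih (s+1) (s+1+1) (by omega) (by omega) (Or.inl rfl) (by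
          rw [if_neg (by omega)] at hfuel ⊢
          omega)
      · subst hs1' hc1
        exact ih 1 2 (by omega) (by omega) (Or.inl rfl) (by
          rw [if_pos rfl] at hfuel
          rw [if_neg (by omega)]
          omega)

lemma slice_paren (P rest : List Char) :
    PySem.List.slice (P ++ rest) (some (P.length : Int)) (some (-1)) = rest.dropLast := by
  simp only [PySem.List.slice, PySem.List.clampIdx]
  rw [if_pos (by omega : (-1:Int) < 0)]
  rw [if_neg (by omega : ¬ ((P.length : Int) < 0))]
  have h1 : (((P ++ rest).length : Int) + -1).toNat = P.length + rest.length - 1 := by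
    simp [List.length_append]; omega
  have h2 : ((P.length : Int)).toNat = P.length := by omega
  rw [h2, min_eq_left (by simp)]
  by_cases hz : ((P ++ rest).length : Int) + -1 < 0
  · rw [if_pos hz]
    have : P = [] ∧ rest = [] := by
      constructor <;> [skip; skip] <;>
        (rw [List.eq_nil_iff_length_eq_zero]; simp at hz; omega)
    obtain ⟨rfl, rfl⟩ := this
    simp
  · rw [if_neg hz, h1]
    rw [show P.length + rest.length - 1 - P.length = rest.length - 1 by omega]
    rw [List.drop_left, List.dropLast_eq_take]

-- ---- B's taken-set vs the candidate names ----
lemma taken_mem (nn : String) (hm : List (String × Int)) (k : Int) (hk : 1 ≤ k) :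
    PySem.Set.contains (nFTaken (nn ++ "(") hm) (PySem.Int.toStr k) =
      (hm.map Prod.fst).contains (pvCand nn k) := by
  have hpreL : (nn ++ "(").toList = nn.toList ++ ['('] := by simp
  have hlen : PySem.Str.len (nn ++ "(") = ((nn.toList.length + 1 : Nat) : Int) := by
    rw [PySem.Str.len_eq, hpreL]; simp
  rw [Bool.eq_iff_iff]
  simp only [PySem.Set.contains, List.contains_iff_mem, nFTaken, PySem.Set.mem_ofList,
    List.mem_filterMap]
  constructor
  · rintro ⟨key, hkey, hif⟩
    by_cases hc : (PySem.Str.startswith key (nn ++ "(") && PySem.Str.endswith key ")") = true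
    swap
    · rw [if_neg hc] at hif; exact absurd hif (by simp)
    rw [if_pos hc] at hif
    obtain ⟨hsw, hew⟩ := Bool.and_eq_true_iff.1 hc
    rw [PySem.Str.startswith_eq] at hsw
    have hswp := (PySem.Chars.startswith_iff _ _).1 hsw
    rw [hpreL] at hswp
    obtain ⟨rest, hrest⟩ := hswp
    rw [PySem.Str.endswith_eq] at hew
    have hewp := (PySem.Chars.endswith_iff _ _).1 hew
    have hsl := congrArg String.toList (Option.some.inj hif)
    rw [PySem.Str.toList_slice, PySem.Int.toList_toStr] at hsl
    simp only [PySem.Chars.slice_eq_listSlice] at hsl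
    rw [hlen] at hsl
    rw [← hrest] at hsl
    rw [show ((nn.toList.length + 1 : Nat) : Int) = ((nn.toList ++ ['(']).length : Int) by simp] at hsl
    rw [show nn.toList ++ ['('] ++ rest = (nn.toList ++ ['(']) ++ rest from by simp] at hsl
    rw [slice_paren] at hsl
    -- rest ends with ')' and its dropLast is str(k)
    rcases List.eq_nil_or_concat rest with hnil | ⟨l', a, rfl⟩
    · subst hnil
      simp at hsl
      exact absurd hsl (toChars_ne_nil hk)
    · simp only [List.concat_eq_append] at hrest hsl
      have ha : a = ')' := by
        obtain ⟨u, hu⟩ := hewp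
        have h1 : key.toList.getLast? = some ')' := by
          rw [← hu]
          have h2 : (")" : String).toList = [')'] := rfl
          rw [h2]
          exact List.getLast?_concat
        rw [← hrest] at h1
        rw [show nn.toList ++ ['('] ++ (l' ++ [a]) = (nn.toList ++ ['('] ++ l') ++ [a] from by simp] at h1
        rw [List.getLast?_concat] at h1
        exact Option.some.inj h1
      subst ha
      rw [List.dropLast_concat] at hsl
      have hkeyeq : key = pvCand nn k := by
        rw [← String.toList_inj, ← hrest, toList_pvCand, ← hsl]
        simp
      rw [← hkeyeq]
      exact hkey
  · intro hmem
    refine ⟨pvCand nn k, hmem, ?_⟩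
    have hsw : PySem.Str.startswith (pvCand nn k) (nn ++ "(") = true := by
      rw [PySem.Str.startswith_eq]
      rw [PySem.Chars.startswith_iff, toList_pvCand, hpreL]
      exact ⟨PySem.Int.toChars k ++ [')'], by simp⟩
    have hew : PySem.Str.endswith (pvCand nn k) ")" = true := by
      rw [PySem.Str.endswith_eq]
      rw [PySem.Chars.endswith_iff, toList_pvCand]
      exact ⟨nn.toList ++ '(' :: PySem.Int.toChars k, by simp⟩
    rw [if_pos (by rw [hsw, hew]; rfl)]
    congr 1
    rw [← String.toList_inj, PySem.Str.toList_slice, PySem.Int.toList_toStr]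
    simp only [PySem.Chars.slice_eq_listSlice]
    rw [hlen, toList_pvCand]
    rw [show ((nn.toList.length + 1 : Nat) : Int) = ((nn.toList ++ ['(']).length : Int) by simp]
    rw [show nn.toList ++ '(' :: (PySem.Int.toChars k ++ [')']) =
        (nn.toList ++ ['(']) ++ (PySem.Int.toChars k ++ [')']) from by simp]
    rw [slice_paren, List.dropLast_concat]

lemma loopB_run (taken : PySem.Set String) (μ : Int)
    (hfree : PySem.Set.contains taken (PySem.Int.toStr μ) = false)
    (hmin : ∀ j : Int, 1 ≤ j → j < μ → PySem.Set.contains taken (PySem.Int.toStr j) = true) :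
    ∀ (f : Nat) (k : Int), 1 ≤ k → k ≤ μ → μ.toNat - k.toNat < f →
      nFFind taken f k = μ := by
  intro f
  induction f with
  | zero => intro k h1 h2 h3; omega
  | succ f ih =>
    intro k h1 h2 h3
    simp only [nFFind]
    by_cases heq : k = μ
    · rw [heq, hfree]
      simp
    · have hlt : k < μ := lt_of_le_of_ne h2 heq
      rw [hmin k h1 hlt, if_pos rfl]
      exact ih (k+1) (by omega) (by omega) (by omega)

lemma toStr_inj {a b : Int} (ha : 1 ≤ a) (hb : 1 ≤ b)
    (h : PySem.Int.toStr a = PySem.Int.toStr b) : a = b := by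
  apply toChars_inj ha hb
  rw [← PySem.Int.toList_toStr, ← PySem.Int.toList_toStr, h]

lemma pigeon (keys : List String) (nn : String) :
    ∃ n : Nat, n ≤ keys.length ∧ keys.contains (pvCand nn (1 + (n:Int))) = false := by
  by_contra h
  have hall : ∀ n : Nat, n ≤ keys.length → keys.contains (pvCand nn (1 + (n:Int))) = true := by
    intro n hn
    cases hb : keys.contains (pvCand nn (1 + (n:Int))) with
    | false => exact absurd ⟨n, hn, hb⟩ h
    | true => rfl
  set l := (List.range (keys.length+1)).map (fun i : Nat => pvCand nn (1 + (i:Int))) with hl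
  have hnd : l.Nodup := by
    refine (List.nodup_range).map_on ?_
    intro x hx y hy hxy
    have := pvCand_inj (nn := nn) (by omega : (1:Int) ≤ 1 + (x:Int)) (by omega) hxy
    omega
  have hsub : ∀ x ∈ l, x ∈ keys := by
    intro x hx
    rw [hl] at hx
    obtain ⟨i, hi, rfl⟩ := List.mem_map.1 hx
    rw [List.mem_range] at hi
    have := hall i (by omega)
    simpa [List.contains_iff_mem] using this
  have := (hnd.subperm hsub).length_le
  simp [hl] at this

theorem nF_spec : Claim_equal_nF := by
  unfold Claim_equal_nF
  intro nn fs hm _hdom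
  unfold Spec_nF
  cases hmem : (hm.map Prod.fst).contains nn with
  | false =>
    rw [nF, nF_alt]
    rw [show hm.length + 3 = (hm.length + 2) + 1 from rfl]
    rw [loopA_enter, hmem]
    simp
  | true =>
    -- the least free index μ
    obtain ⟨n0, hn0le, hn0⟩ := pigeon (hm.map Prod.fst) nn
    have hex : ∃ n : Nat, (hm.map Prod.fst).contains (pvCand nn (1 + (n:Int))) = false := ⟨n0, hn0⟩
    set μ : Int := 1 + ((Nat.find hex : Nat) : Int) with hμ
    have hμ1 : 1 ≤ μ := by omega
    have hfree : (hm.map Prod.fst).contains (pvCand nn μ) = false := Nat.find_spec hex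
    have hmin : ∀ j : Int, 1 ≤ j → j < μ → (hm.map Prod.fst).contains (pvCand nn j) = true := by
      intro j hj1 hjμ
      have hm' := Nat.find_min hex (m := (j-1).toNat) (by omega)
      have hj : 1 + (((j-1).toNat : Nat) : Int) = j := by omega
      rw [hj] at hm'
      cases hb : (hm.map Prod.fst).contains (pvCand nn j) with
      | false => exact absurd hb hm'
      | true => rfl
    have hμle : μ.toNat ≤ hm.length + 1 := by
      have : Nat.find hex ≤ n0 := Nat.find_min' hex hn0
      simp at hn0le
      omega
    -- the taken set of B, and μ over it
    have hfreeT : PySem.Set.contains (nFTaken (nn ++ "(") hm) (PySem.Int.toStr μ) = false := by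
      rw [taken_mem nn hm μ hμ1, hfree]
    have hminT : ∀ j : Int, 1 ≤ j → j < μ → PySem.Set.contains (nFTaken (nn ++ "(") hm) (PySem.Int.toStr j) = true := by
      intro j h1 h2
      rw [taken_mem nn hm j h1, hmin j h1 h2]
    have htb : μ.toNat - 1 ≤ (nFTaken (nn ++ "(") hm).length := by
      set l := (List.range (μ.toNat - 1)).map (fun i : Nat => PySem.Int.toStr (1 + (i:Int))) with hl
      have hnd : l.Nodup := by
        refine (List.nodup_range).map_on ?_
        intro x hx y hy hxy
        have := toStr_inj (by omega : (1:Int) ≤ 1 + (x:Int)) (by omega) hxy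
        omega
      have hsub : ∀ x ∈ l, x ∈ nFTaken (nn ++ "(") hm := by
        intro x hx
        rw [hl] at hx
        obtain ⟨i, hi, rfl⟩ := List.mem_map.1 hx
        rw [List.mem_range] at hi
        have := hminT (1 + (i:Int)) (by omega) (by omega)
        simpa [PySem.Set.contains, List.contains_iff_mem] using this
      have := (hnd.subperm hsub).length_le
      simpa [hl] using this
    -- run A
    have hA : nF nn fs hm = pvCand nn μ := by
      rw [nF]
      rw [show hm.length + 3 = (hm.length + 2) + 1 from rfl]
      rw [loopA_enter, hmem, if_pos rfl]
      exact loopA_run (hm.map Prod.fst) nn μ hμ1 hfree hmin (hm.length + 2) 1 1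
        (by omega) (by omega) (Or.inr ⟨rfl, rfl⟩) (by rw [if_pos rfl]; omega)
    -- run B
    have hB : nF_alt nn fs hm = pvCand nn μ := by
      rw [nF_alt]
      rw [if_neg (by rw [hmem]; simp)]
      show (nn ++ "(") ++ PySem.Int.toStr (nFFind (nFTaken (nn ++ "(") hm)
        ((nFTaken (nn ++ "(") hm).length + 1) 1) ++ ")" = pvCand nn μ
      rw [loopB_run (nFTaken (nn ++ "(") hm) μ hfreeT hminT _ 1 (by omega) (by omega) (by omega)]
      rfl
    rw [hA, hB]
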